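-- pv_equiv track=rewrite | github.com/Waseem0718/Python_programs | Strings/longest_sub_bt_same_ch.py | long
-- ===== SOURCE A (Python) =====
-- def long(str):
--     maxi = 0
--     l , r = 0,len(str)-1
--     for i in range(len(str)):
--         while True:
--             if str[l] == str[r]:
--                 maxi = max(maxi,len(str[l+1:r]))
--                 break
--             else:
--                 r -= 1
--         l += 1
--         r = len(str)-1
--
--     return maxi
--
-- str = "cdddaadewojad"
-- ===== SOURCE B (Python) =====
-- def long(str):
--     last = {}
--     for i, c in enumerate(str):
--         last[c] = i
--     maxi = 0
--     for i, c in enumerate(str):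
--         maxi = max(maxi, last[c] - i - 1)
--     return maxi
-- ===== Notes on version B (the rewrite author's own statement) =====
-- stated objective: faster
-- what changed: Replaced the quadratic per-index backward scan for a matching boundary character with a dict of last occurrences built in one pass, then a single pass computing last[c]-i-1.
import Mathlib
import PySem

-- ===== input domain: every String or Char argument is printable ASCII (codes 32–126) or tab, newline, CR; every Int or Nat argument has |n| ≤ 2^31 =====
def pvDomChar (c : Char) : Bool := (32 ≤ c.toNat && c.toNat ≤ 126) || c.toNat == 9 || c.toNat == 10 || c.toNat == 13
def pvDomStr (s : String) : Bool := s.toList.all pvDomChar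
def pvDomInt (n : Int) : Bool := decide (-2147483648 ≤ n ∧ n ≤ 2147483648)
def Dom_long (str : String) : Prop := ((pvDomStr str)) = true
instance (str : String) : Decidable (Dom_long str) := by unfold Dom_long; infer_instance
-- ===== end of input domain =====

-- B computes the same result in one pass with a last-occurrence dictionary instead of A's
-- per-index backward scan; equivalence of the RETURN value is proved (no observable mutation).

-- ===== PORT A =====
-- A's inner 'while True' decrements r until str[l] == str[r]; ported as structural recursion
-- on r. In every state A reaches, l ≤ r, so when r = 0 we have l = 0 and the match test is
-- true; the base case takes that branch directly (exact on all reached states).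
-- Indices l, r are the loop's own in-range counters, so str[l]/str[r] is ported as getD.
def longInner (s : List Char) (l : Nat) : Nat → Int
  | 0 => ((PySem.List.slice s (some ((l : Int) + 1)) (some (0 : Int))).length : Int)
  | r + 1 =>
      if s.getD l ' ' = s.getD (r + 1) ' ' then
        ((PySem.List.slice s (some ((l : Int) + 1)) (some ((r : Int) + 1))).length : Int)
      else
        longInner s l r

def long (str : String) : Int :=
  let s := str.toList
  (List.range s.length).foldl (fun maxi l => max maxi (longInner s l (s.length - 1))) 0

-- ===== PORT B =====
def long_alt (str : String) : Int :=
  let s := str.toList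
  let last : PySem.Dict Char Int :=
    (PySem.List.enumerate s 0).foldl (fun d p => d.insert p.2 p.1) PySem.Dict.empty
  (PySem.List.enumerate s 0).foldl (fun maxi p => max maxi (last.getD p.2 0 - p.1 - 1)) 0

-- ===== PRECONDITION & SPEC =====
def Spec_long (str : String) (out : Int) : Prop := out = long_alt str
instance (str : String) (out : Int) : Decidable (Spec_long str out) := by unfold Spec_long; infer_instance

-- ===== CLAIM (what is proved, stated in full; the proofs are below) =====
def Claim_equal_long : Prop := ∀ (str : String), Dom_long str → Spec_long str (long str)

-- ===== LEMMAS AND PROOFS =====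

-- index of the LAST occurrence of c in s (none if absent), structurally
def lastOccO : List Char → Char → Option Nat
  | [], _ => none
  | x :: xs, c =>
      match lastOccO xs c with
      | some k => some (k + 1)
      | none => if x = c then some 0 else none

-- greatest index ≤ r whose character is c (0 if none), counting down like A's inner loop
def lastLe (s : List Char) (c : Char) : Nat → Nat
  | 0 => 0
  | r + 1 => if s.getD (r + 1) ' ' = c then r + 1 else lastLe s c r

lemma longInner_eq_lastLe (s : List Char) (l : Nat) : ∀ r : Nat,
    longInner s l r =
      ((PySem.List.slice s (some ((l : Int) + 1))
        (some ((lastLe s (s.getD l ' ') r : Nat) : Int))).length : Int) := by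
  intro r
  induction r with
  | zero => simp [longInner, lastLe]
  | succ r ih =>
      simp only [longInner, lastLe]
      by_cases h : s.getD l ' ' = s.getD (r + 1) ' '
      · rw [if_pos h, if_pos h.symm]
        norm_cast
      · rw [if_neg h, if_neg (fun h' => h h'.symm), ih]

lemma dict_fold_getD (c : Char) (d0 : Int) : ∀ (s : List Char) (start : Int) (d : PySem.Dict Char Int),
    ((PySem.List.enumerate s start).foldl (fun d p => d.insert p.2 p.1) d).getD c d0
      = match lastOccO s c with
        | some k => start + (k : Int)
        | none => d.getD c d0 := by
  intro s
  induction s with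
  | nil => intro start d; simp [PySem.List.enumerate_nil, lastOccO]
  | cons x xs ih =>
      intro start d
      rw [PySem.List.enumerate_cons]
      simp only [List.foldl_cons]
      rw [ih (start + 1) (d.insert x start)]
      cases h : lastOccO xs c with
      | some k => simp [lastOccO, h]; ring
      | none =>
          simp only [lastOccO, h]
          rw [PySem.Dict.getD_insert]
          by_cases hxc : x = c
          · simp [hxc]
          · rw [if_neg hxc, if_neg (fun h' : c = x => hxc h'.symm)]

lemma lastOccO_none (c : Char) : ∀ (s : List Char), lastOccO s c = none →
    ∀ j, j < s.length → s.getD j ' ' ≠ c := by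
  intro s
  induction s with
  | nil => intro _ j hj; simp at hj
  | cons x xs ih =>
      intro h j hj
      simp only [lastOccO] at h
      cases hx : lastOccO xs c with
      | some k => rw [hx] at h; simp at h
      | none =>
          rw [hx] at h
          by_cases hxc : x = c
          · simp [hxc] at h
          · cases j with
            | zero => simpa using hxc
            | succ j => simp only [List.getD_cons_succ]; exact ih hx j (by simpa using hj)

lemma lastOccO_spec (c : Char) : ∀ (s : List Char) (k : Nat), lastOccO s c = some k →
    k < s.length ∧ s.getD k ' ' = c ∧ ∀ j, k < j → j < s.length → s.getD j ' ' ≠ c := by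
  intro s
  induction s with
  | nil => intro k h; simp [lastOccO] at h
  | cons x xs ih =>
      intro k h
      simp only [lastOccO] at h
      cases hx : lastOccO xs c with
      | some k' =>
          rw [hx] at h
          simp only [Option.some.injEq] at h
          subst h
          obtain ⟨h1, h2, h3⟩ := ih k' hx
          refine ⟨by simpa using h1, by simpa using h2, ?_⟩
          intro j hj hjlen
          cases j with
          | zero => omega
          | succ j => simp only [List.getD_cons_succ]; exact h3 j (by omega) (by simpa using hjlen)
      | none =>
          rw [hx] at h
          by_cases hxc : x = c
          · have hk0 : k = 0 := by rw [hxc] at h; simpa using h.symm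
            subst hk0
            refine ⟨by simp, by simpa using hxc, ?_⟩
            intro j hj hjlen
            cases j with
            | zero => omega
            | succ j => simp only [List.getD_cons_succ]
                        exact lastOccO_none c xs hx j (by simpa using hjlen)
          · simp [hxc] at h

lemma lastOccO_mem (c : Char) (s : List Char) (h : c ∈ s) : ∃ k, lastOccO s c = some k := by
  cases hx : lastOccO s c with
  | some k => exact ⟨k, rfl⟩
  | none =>
      obtain ⟨j, hj, hje⟩ := List.getElem_of_mem h
      exact absurd (show s.getD j ' ' = c by
          simp [List.getD_eq_getElem?_getD, List.getElem?_eq_getElem hj, hje])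
        (lastOccO_none c s hx j hj)

lemma lastLe_spec (s : List Char) (c : Char) : ∀ r : Nat,
    (∃ j, j ≤ r ∧ s.getD j ' ' = c) →
    lastLe s c r ≤ r ∧ s.getD (lastLe s c r) ' ' = c ∧
      ∀ j, lastLe s c r < j → j ≤ r → s.getD j ' ' ≠ c := by
  intro r
  induction r with
  | zero =>
      rintro ⟨j, hj, hje⟩
      interval_cases j
      refine ⟨le_refl _, by simpa [lastLe] using hje, ?_⟩
      intro j h1 h2
      simp only [lastLe] at h1
      omega
  | succ r ih =>
      rintro ⟨j, hj, hje⟩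
      have he : lastLe s c (r + 1) = if s.getD (r + 1) ' ' = c then r + 1 else lastLe s c r := rfl
      by_cases h : s.getD (r + 1) ' ' = c
      · rw [he, if_pos h]
        exact ⟨le_refl _, h, fun j h1 h2 => by omega⟩
      · rw [he, if_neg h]
        have hjr : j ≤ r := by
          rcases Nat.lt_succ_iff_lt_or_eq.mp (Nat.lt_succ_of_le hj) with h' | h'
          · omega
          · exact absurd (h' ▸ hje) h
        obtain ⟨h1, h2, h3⟩ := ih ⟨j, hjr, hje⟩
        refine ⟨by omega, h2, ?_⟩
        intro j' hj1 hj2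
        rcases Nat.lt_succ_iff_lt_or_eq.mp (Nat.lt_succ_of_le hj2) with h' | h'
        · exact h3 j' hj1 (by omega)
        · exact h' ▸ h

-- the two "last occurrence" notions coincide when a match exists
lemma lastLe_eq_lastOccO (s : List Char) (c : Char) (k : Nat)
    (hk : lastOccO s c = some k) : lastLe s c (s.length - 1) = k := by
  obtain ⟨h1, h2, h3⟩ := lastOccO_spec c s k hk
  have hex : ∃ j, j ≤ s.length - 1 ∧ s.getD j ' ' = c := ⟨k, by omega, h2⟩
  obtain ⟨g1, g2, g3⟩ := lastLe_spec s c (s.length - 1) hex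
  by_contra hne
  rcases Nat.lt_or_ge (lastLe s c (s.length - 1)) k with h' | h'
  · exact g3 k h' (by omega) h2
  · exact h3 (lastLe s c (s.length - 1)) (by omega) (by omega) g2

lemma foldl_max_congr (A B : Nat → Int) : ∀ (xs : List Nat) (m : Int), 0 ≤ m →
    (∀ l ∈ xs, A l = max 0 (B l)) →
    xs.foldl (fun m l => max m (A l)) m = xs.foldl (fun m l => max m (B l)) m := by
  intro xs
  induction xs with
  | nil => intro m _ _; rfl
  | cons x xs ih =>
      intro m hm h
      simp only [List.foldl_cons]
      have hx : A x = max 0 (B x) := h x (by simp)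
      have : max m (A x) = max m (B x) := by rw [hx]; omega
      rw [this]
      have : max m (A x) = max m (B x) := this
      calc xs.foldl (fun m l => max m (A l)) (max m (B x))
          = xs.foldl (fun m l => max m (A l)) (max m (A x)) := by rw [this]
        _ = xs.foldl (fun m l => max m (B l)) (max m (A x)) := ih _ (by omega) (fun l hl => h l (by simp [hl]))
        _ = xs.foldl (fun m l => max m (B l)) (max m (B x)) := by rw [this]

-- pointwise: A's inner-loop value equals max 0 (lastOcc - l - 1)
lemma pointwise (s : List Char) (l : Nat) (hl : l < s.length) (k : Nat)
    (hk : lastOccO s (s.getD l ' ') = some k) :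
    longInner s l (s.length - 1) = max 0 ((k : Int) - (l : Int) - 1) := by
  rw [longInner_eq_lastLe, lastLe_eq_lastOccO s _ k hk]
  obtain ⟨h1, _, _⟩ := lastOccO_spec _ s k hk
  have : PySem.List.slice s (some ((l : Int) + 1)) (some ((k : Nat) : Int))
       = (s.drop (l + 1)).take (k - (l + 1)) := by
    have h2 := PySem.List.slice_natCast s (l + 1) k
    push_cast at h2 ⊢
    exact h2
  rw [this]
  simp only [List.length_take, List.length_drop]
  omega

lemma getD_mem (s : List Char) (l : Nat) (hl : l < s.length) : s.getD l ' ' ∈ s := by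
  rw [List.getD_eq_getElem?_getD, List.getElem?_eq_getElem hl]
  exact List.getElem_mem hl

theorem long_eq_long_alt (str : String) : long str = long_alt str := by
  unfold long long_alt
  set s := str.toList with hs
  dsimp only
  -- rewrite B's second fold as a fold over List.range s.length
  rw [PySem.List.enumerate_eq_map_pyRange s ' ', List.foldl_map,
      PySem.List.pyRange_one, List.foldl_map]
  simp only [Int.sub_zero, Int.zero_add, PySem.List.pyGetD_natCast]
  apply foldl_max_congr _ _ _ 0 (le_refl 0)
  intro l hl
  have hl' : l < s.length := List.mem_range.mp hl
  obtain ⟨k, hk⟩ := lastOccO_mem (s.getD l ' ') s (getD_mem s l hl')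
  rw [pointwise s l hl' k hk]
  congr 1
  have hd := dict_fold_getD (s.getD l ' ') 0 s 0 PySem.Dict.empty
  rw [hk] at hd
  rw [PySem.List.enumerate_eq_map_pyRange s ' ', PySem.List.pyRange_one] at hd
  simp only [Int.sub_zero, Int.zero_add] at hd
  rw [hd]

-- ===== VERDICT (by name: the statement is the Claim_ definition above) =====
theorem long_spec : Claim_equal_long := by
  intro str _
  unfold Spec_long
  exact long_eq_long_alt str
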